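-- pv_equiv track=rewrite | github.com/tukaram40k/aa-tournament | astrologer.py | strategy
-- ===== SOURCE A (Python) =====
-- def strategy(my_history: list[int], opponent_history: list[int], rounds: int | None) -> int:
--     ZODIAC_SIGNS = [
--         'ARIES', 'TAURUS', 'GEMINI', 'CANCER', 'LEO', 'VIRGO',
--         'LIBRA', 'SCORPIO', 'SAGITTARIUS', 'CAPRICORN', 'AQUARIUS', 'PISCES'
--     ]
--
--     RULES_OF_DESTINY = ['ELEMENT', 'DAY_AND_NIGHT_RULERSHIP', 'HEMISPHERE']
--
--     ELEMENT_RULE = {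
--         'FIRE': ['ARIES', 'LEO', 'SAGITTARIUS'],
--         'EARTH': ['TAURUS', 'VIRGO', 'CAPRICORN'],
--         'AIR': ['GEMINI', 'LIBRA', 'AQUARIUS'],
--         'WATER': ['CANCER', 'SCORPIO', 'PISCES']
--     }
--
--     DAY_AND_NIGHT_RULERSHIP = {
--         'DAY': ['LEO', 'SAGITTARIUS', 'AQUARIUS', 'ARIES', 'LIBRA', 'GEMINI'],
--         'NIGHT': ['CANCER', 'PISCES', 'CAPRICORN', 'SCORPIO', 'TAURUS', 'VIRGO']
--     }
--
--     HEMISPHERE_RULE = {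
--         'SPRING': ['ARIES', 'TAURUS', 'GEMINI'],
--         'SUMMER': ['CANCER', 'LEO', 'VIRGO'],
--         'FALL': ['LIBRA', 'SCORPIO', 'SAGITTARIUS'],
--         'WINTER': ['CAPRICORN', 'AQUARIUS', 'PISCES']
--     }
--
--     PREDICTION_RESULT = 1
--
--     player_destiny = sum(my_history)
--     player_rule_of_destiny = RULES_OF_DESTINY[player_destiny % 3]
--
--     opponent_destiny = sum(opponent_history)
--     opponent_sign = ZODIAC_SIGNS[opponent_destiny % 12]
--
--     if player_rule_of_destiny == 'ELEMENT':
--         opponent_element = 'FIRE'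
--
--         for element in ELEMENT_RULE:
--             if opponent_sign in ELEMENT_RULE[element]:
--                 opponent_element = element
--
--         if opponent_element in ['FIRE', 'AIR']:
--             PREDICTION_RESULT = 1
--         else:
--             PREDICTION_RESULT = 0
--
--     elif player_rule_of_destiny == 'DAY_AND_NIGHT_RULERSHIP':
--         opponent_time = 'DAY'
--
--         for time in DAY_AND_NIGHT_RULERSHIP:
--             if opponent_sign in DAY_AND_NIGHT_RULERSHIP[time]:
--                 opponent_time = time
--
--         if opponent_time == 'DAY':
--             PREDICTION_RESULT = 1
--         else:
--             PREDICTION_RESULT = 0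
--
--     elif player_rule_of_destiny == 'HEMISPHERE':
--         opponent_season = 'SPRING'
--
--         for season in HEMISPHERE_RULE:
--             if opponent_sign in HEMISPHERE_RULE[season]:
--                 opponent_season = season
--
--         if opponent_season in ['SPRING', 'SUMMER']:
--             PREDICTION_RESULT = 1
--         else:
--             PREDICTION_RESULT = 0
--
--     return PREDICTION_RESULT
-- ===== SOURCE B (Python) =====
-- def strategy(my_history: list[int], opponent_history: list[int], rounds: int | None) -> int:
--     # The winning signs for rules 0 (ELEMENT: fire/air) and 1 (day rulership) are exactly
--     # the even zodiac indices; for rule 2 (hemisphere: spring/summer) the first six indices.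
--     sign = sum(opponent_history) % 12
--     if sum(my_history) % 3 == 2:
--         return 1 if sign < 6 else 0
--     return 1 - sign % 2
-- ===== Notes on version B (the rewrite author's own statement) =====
-- stated objective: simpler
-- what changed: Replaced the zodiac-sign tables, the three if/elif rule branches and their category-scanning loops by two arithmetic tests: the winning signs for rules 0 and 1 are exactly the even zodiac indices and for rule 2 the first six indices, so B returns 1-sign%2 or [sign<6] directly from the two sums.
import Mathlib
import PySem

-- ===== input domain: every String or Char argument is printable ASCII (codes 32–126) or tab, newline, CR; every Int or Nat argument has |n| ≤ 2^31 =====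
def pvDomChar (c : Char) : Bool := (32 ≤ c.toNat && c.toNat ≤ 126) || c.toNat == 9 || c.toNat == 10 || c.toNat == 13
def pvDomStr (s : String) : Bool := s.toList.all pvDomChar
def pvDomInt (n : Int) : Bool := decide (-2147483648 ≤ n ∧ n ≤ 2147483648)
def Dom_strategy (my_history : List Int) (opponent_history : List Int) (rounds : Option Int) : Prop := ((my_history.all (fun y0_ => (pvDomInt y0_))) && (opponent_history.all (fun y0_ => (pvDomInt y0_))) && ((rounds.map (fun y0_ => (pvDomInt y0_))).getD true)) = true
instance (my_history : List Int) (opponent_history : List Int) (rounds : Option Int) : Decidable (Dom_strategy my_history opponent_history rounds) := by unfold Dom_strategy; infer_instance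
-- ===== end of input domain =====

-- B replaces the zodiac tables and three rule branches by two arithmetic tests on the history sums (simpler).


-- ===== PORT A =====
def strategy (my_history : List Int) (opponent_history : List Int) (rounds : Option Int) : Int :=
  let zodiacSigns : List String :=
    ["ARIES", "TAURUS", "GEMINI", "CANCER", "LEO", "VIRGO",
     "LIBRA", "SCORPIO", "SAGITTARIUS", "CAPRICORN", "AQUARIUS", "PISCES"]
  let rulesOfDestiny : List String := ["ELEMENT", "DAY_AND_NIGHT_RULERSHIP", "HEMISPHERE"]
  let elementRule : PySem.Dict String (List String) := PySem.Dict.ofList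
    [("FIRE", ["ARIES", "LEO", "SAGITTARIUS"]),
     ("EARTH", ["TAURUS", "VIRGO", "CAPRICORN"]),
     ("AIR", ["GEMINI", "LIBRA", "AQUARIUS"]),
     ("WATER", ["CANCER", "SCORPIO", "PISCES"])]
  let dayAndNightRulership : PySem.Dict String (List String) := PySem.Dict.ofList
    [("DAY", ["LEO", "SAGITTARIUS", "AQUARIUS", "ARIES", "LIBRA", "GEMINI"]),
     ("NIGHT", ["CANCER", "PISCES", "CAPRICORN", "SCORPIO", "TAURUS", "VIRGO"])]
  let hemisphereRule : PySem.Dict String (List String) := PySem.Dict.ofList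
    [("SPRING", ["ARIES", "TAURUS", "GEMINI"]),
     ("SUMMER", ["CANCER", "LEO", "VIRGO"]),
     ("FALL", ["LIBRA", "SCORPIO", "SAGITTARIUS"]),
     ("WINTER", ["CAPRICORN", "AQUARIUS", "PISCES"])]
  let playerDestiny := my_history.sum
  -- index playerDestiny % 3 is always in range, so pyGet? is always some; .getD "" is never taken
  let playerRuleOfDestiny := (PySem.List.pyGet? rulesOfDestiny (PySem.Int.mod playerDestiny 3)).getD ""
  let opponentDestiny := opponent_history.sum
  let opponentSign := (PySem.List.pyGet? zodiacSigns (PySem.Int.mod opponentDestiny 12)).getD ""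
  if playerRuleOfDestiny == "ELEMENT" then
    let opponentElement := elementRule.keys.foldl
      (fun acc element => if (elementRule.getD element []).contains opponentSign then element else acc) "FIRE"
    if ["FIRE", "AIR"].contains opponentElement then 1 else 0
  else if playerRuleOfDestiny == "DAY_AND_NIGHT_RULERSHIP" then
    let opponentTime := dayAndNightRulership.keys.foldl
      (fun acc time => if (dayAndNightRulership.getD time []).contains opponentSign then time else acc) "DAY"
    if opponentTime == "DAY" then 1 else 0
  else if playerRuleOfDestiny == "HEMISPHERE" then
    let opponentSeason := hemisphereRule.keys.foldl
      (fun acc season => if (hemisphereRule.getD season []).contains opponentSign then season else acc) "SPRING"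
    if ["SPRING", "SUMMER"].contains opponentSeason then 1 else 0
  else 1

-- ===== PORT B =====
def strategy_alt (my_history : List Int) (opponent_history : List Int) (rounds : Option Int) : Int :=
  let sign := PySem.Int.mod opponent_history.sum 12
  if PySem.Int.mod my_history.sum 3 == 2 then
    (if sign < 6 then 1 else 0)
  else 1 - PySem.Int.mod sign 2

-- ===== PRECONDITION & SPEC =====
def Spec_strategy (my_history : List Int) (opponent_history : List Int) (rounds : Option Int) (out : Int) : Prop := out = strategy_alt my_history opponent_history rounds
instance (my_history : List Int) (opponent_history : List Int) (rounds : Option Int) (out : Int) : Decidable (Spec_strategy my_history opponent_history rounds out) := by unfold Spec_strategy; infer_instance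

-- ===== CLAIM (what is proved, stated in full; the proofs are below) =====
def Claim_equal_strategy : Prop := ∀ (my_history : List Int) (opponent_history : List Int) (rounds : Option Int), Dom_strategy my_history opponent_history rounds → Spec_strategy my_history opponent_history rounds (strategy my_history opponent_history rounds)

-- ===== LEMMAS AND PROOFS =====

theorem strategy_eq_alt (my_history opponent_history : List Int) (rounds : Option Int) :
    strategy my_history opponent_history rounds = strategy_alt my_history opponent_history rounds := by
  have ha0 : 0 ≤ PySem.Int.mod my_history.sum 3 := PySem.Int.mod_nonneg _ (by norm_num)
  have ha1 : PySem.Int.mod my_history.sum 3 < 3 := PySem.Int.mod_lt _ (by norm_num)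
  have hb0 : 0 ≤ PySem.Int.mod opponent_history.sum 12 := PySem.Int.mod_nonneg _ (by norm_num)
  have hb1 : PySem.Int.mod opponent_history.sum 12 < 12 := PySem.Int.mod_lt _ (by norm_num)
  simp only [strategy, strategy_alt]
  generalize PySem.Int.mod my_history.sum 3 = a at ha0 ha1 ⊢
  generalize PySem.Int.mod opponent_history.sum 12 = b at hb0 hb1 ⊢
  interval_cases a <;> interval_cases b <;> decide

-- ===== VERDICT (by name: the statement is the Claim_ definition above) =====
theorem strategy_spec : Claim_equal_strategy := by
  intro my_history opponent_history rounds _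
  unfold Spec_strategy
  exact strategy_eq_alt my_history opponent_history rounds
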